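-- pv_equiv track=rewrite | github.com/hannaheptapod/atco | pg/adt_all_20231116_1/f/main.py | solve
-- ===== SOURCE A (Python) =====
-- def solve(h1, h2, h3, w1, w2, w3):
--     from itertools import product
--
--     cnt = 0
--     for a, b, d, e in product(range(1, 30), repeat=4):
--         c = h1 - a - b
--         f = h2 - d - e
--         g = w1 - a - d
--         h = w2 - b - e
--         i = w3 - c - f
--
--         if c > 0 and f > 0 and g > 0 and h > 0 and i > 0 and (g + h + i) == h3: cnt += 1
--
--     return cnt
-- ===== SOURCE B (Python) =====
-- def solve(h1, h2, h3, w1, w2, w3):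
--     # g+h+i == w1+w2+w3-h1-h2 identically, so the h3 test is input-only;
--     # the innermost loop over e is replaced by a closed-form interval count.
--     if w1 + w2 + w3 - h1 - h2 != h3:
--         return 0
--     cnt = 0
--     for a in range(1, 30):
--         for b in range(1, 30):
--             for d in range(1, 30):
--                 if h1 - a - b > 0 and w1 - a - d > 0:
--                     cnt += max(0, min(29, h2 - d - 1, w2 - b - 1)
--                                - max(1, h1 + h2 - a - b - d - w3 + 1) + 1)
--     return cnt
-- ===== Notes on version B (the rewrite author's own statement) =====
-- stated objective: faster
-- what changed: B tests the h3 constraint once up front (g+h+i is the input constant w1+w2+w3-h1-h2, independent of the loop variables) and replaces the innermost 29-iteration loop over e by a closed-form count of the integer interval that the remaining inequalities cut out, so B does 29^3 constant-time steps instead of 29^4.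
import Mathlib
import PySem

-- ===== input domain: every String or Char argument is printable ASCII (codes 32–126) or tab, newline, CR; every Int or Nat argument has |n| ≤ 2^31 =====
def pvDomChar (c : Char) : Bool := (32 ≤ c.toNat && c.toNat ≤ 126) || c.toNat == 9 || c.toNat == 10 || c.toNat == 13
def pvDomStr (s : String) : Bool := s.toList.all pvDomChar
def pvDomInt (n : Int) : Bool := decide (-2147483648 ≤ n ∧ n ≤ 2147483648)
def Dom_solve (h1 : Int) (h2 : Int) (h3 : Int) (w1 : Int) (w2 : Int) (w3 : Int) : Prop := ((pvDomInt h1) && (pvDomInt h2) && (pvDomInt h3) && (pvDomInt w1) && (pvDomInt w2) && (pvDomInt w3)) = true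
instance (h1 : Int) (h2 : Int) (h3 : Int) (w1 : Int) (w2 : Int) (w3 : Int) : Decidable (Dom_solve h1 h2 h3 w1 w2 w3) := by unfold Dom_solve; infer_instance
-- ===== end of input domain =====

-- B drops the h3 test from the loop body (g+h+i is a constant of the input) and replaces
-- the innermost loop over e by a closed-form interval count: ~29× fewer iterations.

-- ===== PORT A =====
def solve (h1 : Int) (h2 : Int) (h3 : Int) (w1 : Int) (w2 : Int) (w3 : Int) : Int :=
  (PySem.List.pyRange 1 30 1).foldl (fun cnt a =>
    (PySem.List.pyRange 1 30 1).foldl (fun cnt b =>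
      (PySem.List.pyRange 1 30 1).foldl (fun cnt d =>
        (PySem.List.pyRange 1 30 1).foldl (fun cnt e =>
          let c := h1 - a - b
          let f := h2 - d - e
          let g := w1 - a - d
          let h := w2 - b - e
          let i := w3 - c - f
          if c > 0 ∧ f > 0 ∧ g > 0 ∧ h > 0 ∧ i > 0 ∧ g + h + i = h3 then cnt + 1 else cnt)
          cnt) cnt) cnt) 0

-- ===== PORT B =====
def solve_alt (h1 : Int) (h2 : Int) (h3 : Int) (w1 : Int) (w2 : Int) (w3 : Int) : Int :=
  if w1 + w2 + w3 - h1 - h2 ≠ h3 then 0 else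
  (PySem.List.pyRange 1 30 1).foldl (fun cnt a =>
    (PySem.List.pyRange 1 30 1).foldl (fun cnt b =>
      (PySem.List.pyRange 1 30 1).foldl (fun cnt d =>
        if h1 - a - b > 0 ∧ w1 - a - d > 0 then
          cnt + max 0 (min 29 (min (h2 - d - 1) (w2 - b - 1))
                       - max 1 (h1 + h2 - a - b - d - w3 + 1) + 1)
        else cnt) cnt) cnt) 0

-- ===== PRECONDITION & SPEC =====
def Spec_solve (h1 : Int) (h2 : Int) (h3 : Int) (w1 : Int) (w2 : Int) (w3 : Int) (out : Int) : Prop := out = solve_alt h1 h2 h3 w1 w2 w3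
instance (h1 : Int) (h2 : Int) (h3 : Int) (w1 : Int) (w2 : Int) (w3 : Int) (out : Int) : Decidable (Spec_solve h1 h2 h3 w1 w2 w3 out) := by unfold Spec_solve; infer_instance

-- ===== CLAIM (what is proved, stated in full; the proofs are below) =====
def Claim_equal_solve : Prop := ∀ (h1 : Int) (h2 : Int) (h3 : Int) (w1 : Int) (w2 : Int) (w3 : Int), Dom_solve h1 h2 h3 w1 w2 w3 → Spec_solve h1 h2 h3 w1 w2 w3 (solve h1 h2 h3 w1 w2 w3)

-- ===== LEMMAS AND PROOFS =====

-- counting loop 'for e in l: if p e: cnt += 1' started from `init`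
theorem foldl_count_shift (p : Int → Prop) [DecidablePred p] (l : List Int) (init : Int) :
    l.foldl (fun cnt e => if p e then cnt + 1 else cnt) init
      = init + l.foldl (fun cnt e => if p e then cnt + 1 else cnt) 0 := by
  induction l generalizing init with
  | nil => simp
  | cons x t ih =>
    simp only [List.foldl_cons]
    rw [ih, ih (if p x then 0 + 1 else 0)]
    split <;> omega

theorem foldl_count_congr (p q : Int → Prop) [DecidablePred p] [DecidablePred q]
    (l : List Int) (init : Int) (h : ∀ e ∈ l, p e ↔ q e) :
    l.foldl (fun cnt e => if p e then cnt + 1 else cnt) init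
      = l.foldl (fun cnt e => if q e then cnt + 1 else cnt) init := by
  induction l generalizing init with
  | nil => rfl
  | cons x t ih =>
    simp only [List.foldl_cons]
    rw [if_congr (h x (by simp)) rfl rfl]
    exact ih _ (fun e he => h e (List.mem_cons_of_mem _ he))

-- the count of e ∈ range(a,b) with lo ≤ e ≤ hi, in closed form
theorem count_interval (a b lo hi : Int) :
    (PySem.List.pyRange a b 1).foldl
        (fun cnt e => if lo ≤ e ∧ e ≤ hi then cnt + 1 else cnt) 0
      = max 0 (min (b - 1) hi - max a lo + 1) := by
  by_cases hab : b ≤ a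
  · rw [PySem.List.pyRange_one_eq_nil hab]
    simp only [List.foldl_nil]
    omega
  · rw [PySem.List.pyRange_one_cons (by omega : a < b)]
    simp only [List.foldl_cons]
    rw [foldl_count_shift]
    rw [count_interval (a + 1) b lo hi]
    split <;> omega
termination_by (b - a).toNat
decreasing_by omega

-- inner e-loop of A equals B's closed-form contribution (given the h3 identity)
theorem inner_loop_eq (h1 h2 h3 w1 w2 w3 a b d : Int)
    (hS : w1 + w2 + w3 - h1 - h2 = h3) :
    (PySem.List.pyRange 1 30 1).foldl (fun cnt e =>
        let c := h1 - a - b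
        let f := h2 - d - e
        let g := w1 - a - d
        let h := w2 - b - e
        let i := w3 - c - f
        if c > 0 ∧ f > 0 ∧ g > 0 ∧ h > 0 ∧ i > 0 ∧ g + h + i = h3 then cnt + 1 else cnt) cnt
      = (if h1 - a - b > 0 ∧ w1 - a - d > 0 then
          cnt + max 0 (min 29 (min (h2 - d - 1) (w2 - b - 1))
                       - max 1 (h1 + h2 - a - b - d - w3 + 1) + 1)
        else cnt) := by
  simp only []
  rw [foldl_count_shift]
  by_cases hg : h1 - a - b > 0 ∧ w1 - a - d > 0
  · rw [foldl_count_congr _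
      (fun e => h1 + h2 - a - b - d - w3 + 1 ≤ e ∧ e ≤ min (h2 - d - 1) (w2 - b - 1))
      _ 0 (fun e _ => by constructor <;> intro hx <;> omega)]
    rw [count_interval]
    rw [if_pos hg]
    omega
  · rw [foldl_count_congr _ (fun e => (1:Int) ≤ e ∧ e ≤ 0) _ 0
      (fun e _ => by constructor <;> intro hx <;> omega)]
    rw [count_interval]
    rw [if_neg hg]
    omega

theorem foldl_const (l : List Int) (init : Int) :
    l.foldl (fun cnt (_ : Int) => cnt) init = init := by
  induction l generalizing init with
  | nil => rfl
  | cons x t ih => simp only [List.foldl_cons]; exact ih init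

theorem inner_loop_zero (h1 h2 h3 w1 w2 w3 a b d cnt : Int)
    (hS : w1 + w2 + w3 - h1 - h2 ≠ h3) :
    (PySem.List.pyRange 1 30 1).foldl (fun cnt e =>
        let c := h1 - a - b
        let f := h2 - d - e
        let g := w1 - a - d
        let h := w2 - b - e
        let i := w3 - c - f
        if c > 0 ∧ f > 0 ∧ g > 0 ∧ h > 0 ∧ i > 0 ∧ g + h + i = h3 then cnt + 1 else cnt) cnt
      = cnt := by
  simp only []
  rw [foldl_count_shift]
  rw [foldl_count_congr _ (fun e => (1:Int) ≤ e ∧ e ≤ 0) _ 0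
    (fun e _ => by constructor <;> intro hx <;> omega)]
  rw [count_interval]
  omega

theorem solve_eq_alt (h1 h2 h3 w1 w2 w3 : Int) :
    solve h1 h2 h3 w1 w2 w3 = solve_alt h1 h2 h3 w1 w2 w3 := by
  by_cases hS : w1 + w2 + w3 - h1 - h2 = h3
  · unfold solve solve_alt
    rw [if_neg (by omega : ¬ w1 + w2 + w3 - h1 - h2 ≠ h3)]
    refine List.foldl_ext _ _ 0 (fun cnt a _ => ?_)
    refine List.foldl_ext _ _ cnt (fun cnt b _ => ?_)
    refine List.foldl_ext _ _ cnt (fun cnt d _ => ?_)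
    exact inner_loop_eq h1 h2 h3 w1 w2 w3 a b d hS
  · unfold solve solve_alt
    rw [if_pos hS]
    calc (PySem.List.pyRange 1 30 1).foldl _ 0
        = (PySem.List.pyRange 1 30 1).foldl (fun cnt (_ : Int) => cnt) 0 := by
          refine List.foldl_ext _ _ 0 (fun cnt a _ => ?_)
          calc (PySem.List.pyRange 1 30 1).foldl _ cnt
              = (PySem.List.pyRange 1 30 1).foldl (fun cnt (_ : Int) => cnt) cnt := by
                refine List.foldl_ext _ _ cnt (fun cnt b _ => ?_)
                calc (PySem.List.pyRange 1 30 1).foldl _ cnt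
                    = (PySem.List.pyRange 1 30 1).foldl (fun cnt (_ : Int) => cnt) cnt := by
                      refine List.foldl_ext _ _ cnt (fun cnt d _ => ?_)
                      exact inner_loop_zero h1 h2 h3 w1 w2 w3 a b d cnt hS
                  _ = cnt := foldl_const _ _
            _ = cnt := foldl_const _ _
      _ = 0 := foldl_const _ _

-- ===== VERDICT (by name: the statement is the Claim_ definition above) =====
theorem solve_spec : Claim_equal_solve := by
  intro h1 h2 h3 w1 w2 w3 _
  unfold Spec_solve
  exact solve_eq_alt h1 h2 h3 w1 w2 w3
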